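-- pv_equiv track=rewrite | github.com/gfreundt/pythonCode | Codewars/fibonacci.py | fib_digits
-- ===== SOURCE A (Python) =====
-- def fib_digits(n):
--     a, b = 0, 1
--     for i in range(n - 1):
--         a, b = b, a + b
--     fib = str(b)
--     return sorted(
--         [(str(b).count(str(i)), i) for i in range(10) if str(b).count(str(i)) > 0],
--         key=lambda i: (i[0], i[1]),
--         reverse=True,
--     )
-- ===== SOURCE B (Python) =====
-- def _fd(k):
--     # fast doubling: returns (F(k), F(k+1))
--     if k == 0:
--         return (0, 1)
--     a, b = _fd(k >> 1)
--     c = a * (2 * b - a)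
--     d = a * a + b * b
--     if k & 1:
--         return (d, c + d)
--     return (c, d)
--
--
-- def fib_digits(n):
--     a, _ = _fd(n if n > 1 else 1)
--     counts = {}
--     for ch in str(a):
--         counts[ch] = counts.get(ch, 0) + 1
--     return sorted(
--         [(counts.get(str(d), 0), d) for d in range(10) if counts.get(str(d), 0) > 0],
--         key=lambda t: (t[0], t[1]),
--         reverse=True,
--     )
-- ===== Notes on version B (the rewrite author's own statement) =====
-- stated objective: faster
-- what changed: B computes F(n) by fast-doubling recursion (O(log n) multiplications) instead of A's n-step addition loop, and tallies the digit string in a single dict-counter pass instead of A's ten separate str(b).count scans; the descending (count, digit) sort is unchanged.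
import Mathlib
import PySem

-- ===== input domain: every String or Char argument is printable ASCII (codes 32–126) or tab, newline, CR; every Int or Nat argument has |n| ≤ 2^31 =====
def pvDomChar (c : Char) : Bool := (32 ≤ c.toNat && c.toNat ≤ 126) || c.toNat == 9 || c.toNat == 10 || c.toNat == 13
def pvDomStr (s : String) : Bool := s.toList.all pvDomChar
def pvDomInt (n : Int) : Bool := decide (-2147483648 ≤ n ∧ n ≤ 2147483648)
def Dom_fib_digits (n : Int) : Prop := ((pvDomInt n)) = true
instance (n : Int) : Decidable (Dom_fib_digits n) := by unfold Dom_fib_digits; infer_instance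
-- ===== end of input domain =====

-- B replaces A's O(n)-additions Fibonacci loop by fast doubling and tallies the digit
-- string in one dict-counter pass instead of ten str(b).count scans; same pairs, same sort.

-- ===== PORT A =====
def fib_digits (n : Int) : List (List Int) :=
  let ab := (PySem.List.pyRange 0 (n - 1) 1).foldl
      (fun (s : Int × Int) _i => (s.2, s.1 + s.2)) (0, 1)
  let b := ab.2
  let _fib := PySem.Int.toStr b
  PySem.List.sorted2
    (((PySem.List.pyRange 0 10 1).filter
        (fun i => decide ((0 : Int) < (PySem.Str.count (PySem.Int.toStr b) (PySem.Int.toStr i) : Int)))).map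
      (fun i => [((PySem.Str.count (PySem.Int.toStr b) (PySem.Int.toStr i) : Int)), i]))
    (fun t => PySem.List.pyGetD t 0 0) (fun t => PySem.List.pyGetD t 1 0) true

-- ===== PORT B =====
-- _fd(k): fast doubling; every call has k ≥ 0 (top call k ≥ 1), so it is ported on Nat
-- (k >> 1 = k / 2, k & 1 = k % 2)
def pvFd (k : Nat) : Int × Int :=
  if k = 0 then (0, 1)
  else
    let p := pvFd (k / 2)
    let a := p.1
    let b := p.2
    let c := a * (2 * b - a)
    let d := a * a + b * b
    if k % 2 = 1 then (d, c + d) else (c, d)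
termination_by k
decreasing_by omega

def fib_digits_alt (n : Int) : List (List Int) :=
  let a := (pvFd (if 1 < n then n else 1).toNat).1  -- the argument is ≥ 1, so .toNat is exact
  -- 'for ch in str(a): counts[ch] = counts.get(ch, 0) + 1'; Python iterates a str as
  -- length-1 strings, so the loop variable ch is ported as the one-char string of each char
  let counts : PySem.Dict String Int :=
    (PySem.Int.toStr a).toList.foldl
      (fun d ch => d.insert (String.ofList [ch]) (d.getD (String.ofList [ch]) 0 + 1))
      PySem.Dict.empty
  PySem.List.sorted2
    (((PySem.List.pyRange 0 10 1).filter
        (fun dgt => decide ((0 : Int) < counts.getD (PySem.Int.toStr dgt) 0))).map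
      (fun dgt => [counts.getD (PySem.Int.toStr dgt) 0, dgt]))
    (fun t => PySem.List.pyGetD t 0 0) (fun t => PySem.List.pyGetD t 1 0) true

-- ===== PRECONDITION & SPEC =====
def Spec_fib_digits (n : Int) (out : List (List Int)) : Prop := out = fib_digits_alt n
instance (n : Int) (out : List (List Int)) : Decidable (Spec_fib_digits n out) := by unfold Spec_fib_digits; infer_instance

-- ===== CLAIM (what is proved, stated in full; the proofs are below) =====
def Claim_equal_fib_digits : Prop := ∀ (n : Int), Dom_fib_digits n → Spec_fib_digits n (fib_digits n)

-- ===== LEMMAS AND PROOFS =====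

-- fast doubling computes Fibonacci
theorem pvFd_eq_fib (k : Nat) : pvFd k = ((Nat.fib k : Int), (Nat.fib (k + 1) : Int)) := by
  induction k using Nat.strong_induction_on with
  | _ k ih =>
    rw [pvFd]
    by_cases hk : k = 0
    · simp [hk]
    · have ih2 := ih (k / 2) (by omega)
      simp only [hk, if_false, ih2]
      have hle : Nat.fib (k / 2) ≤ 2 * Nat.fib (k / 2 + 1) := by
        have := Nat.fib_mono (Nat.le_succ (k / 2))
        simp only [Nat.succ_eq_add_one] at this
        omega
      have h2m : ((Nat.fib (2 * (k / 2)) : Nat) : Int)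
          = (Nat.fib (k / 2) : Int) * (2 * (Nat.fib (k / 2 + 1) : Int) - (Nat.fib (k / 2) : Int)) := by
        rw [Nat.fib_two_mul, Nat.cast_mul, Nat.cast_sub hle]
        push_cast; ring
      have h2m1 : ((Nat.fib (2 * (k / 2) + 1) : Nat) : Int)
          = (Nat.fib (k / 2) : Int) * (Nat.fib (k / 2) : Int)
            + (Nat.fib (k / 2 + 1) : Int) * (Nat.fib (k / 2 + 1) : Int) := by
        rw [Nat.fib_two_mul_add_one]; push_cast; ring
      by_cases hp : k % 2 = 1
      · have hk1 : k = 2 * (k / 2) + 1 := by omega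
        have hk2 : k + 1 = 2 * (k / 2) + 1 + 1 := by omega
        simp only [hp, if_true, Prod.mk.injEq]
        refine ⟨?_, ?_⟩
        · conv_rhs => rw [hk1]
          exact h2m1.symm
        · conv_rhs => rw [hk2]
          rw [Nat.fib_add_two, Nat.cast_add, h2m, h2m1]
      · have hp0 : k % 2 = 0 := by omega
        have hk1 : k = 2 * (k / 2) := by omega
        have hk2 : k + 1 = 2 * (k / 2) + 1 := by omega
        simp only [hp, if_false, Prod.mk.injEq]
        refine ⟨?_, ?_⟩
        · conv_rhs => rw [hk1]
          exact h2m.symm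
        · conv_rhs => rw [hk2]
          exact h2m1.symm

-- A's addition loop computes Fibonacci
theorem foldl_fib (l : List Int) (j : Nat) :
    l.foldl (fun (s : Int × Int) _i => (s.2, s.1 + s.2)) ((Nat.fib j : Int), (Nat.fib (j + 1) : Int))
      = ((Nat.fib (j + l.length) : Int), (Nat.fib (j + l.length + 1) : Int)) := by
  induction l generalizing j with
  | nil => simp
  | cons x t ih =>
    simp only [List.foldl_cons, List.length_cons]
    have h1 : ((Nat.fib (j + 1) : Int), (Nat.fib j : Int) + (Nat.fib (j + 1) : Int))
        = ((Nat.fib (j + 1) : Int), (Nat.fib (j + 1 + 1) : Int)) := by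
      rw [show j + 1 + 1 = j + 2 by ring, Nat.fib_add_two]
      push_cast; ring_nf
    rw [h1, show j + (t.length + 1) = (j + 1) + t.length by omega]
    exact ih (j + 1)

-- Chars.count with a single-character needle is List.count
theorem count_go_singleton (c : Char) (fuel : Nat) : ∀ (l : List Char) (acc : Nat),
    l.length ≤ fuel →
    PySem.Chars.count.go [c] fuel l acc = acc + l.count c := by
  induction fuel with
  | zero =>
    intro l acc h
    have : l = [] := by cases l <;> simp_all
    subst this
    simp [PySem.Chars.count.go]
  | succ f ih =>
    intro l acc h
    cases l with
    | nil => simp [PySem.Chars.count.go]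
    | cons x t =>
      rw [PySem.Chars.count.go]
      by_cases hx : x = c
      · have hpre : List.isPrefixOf [c] (x :: t) = true := by simp [List.isPrefixOf, hx]
        simp only [hpre, if_true]
        simp only [List.length_cons, List.length_nil, List.drop_succ_cons, List.drop_zero]
        rw [ih t (acc + 1) (by simpa using h), List.count_cons]
        simp [hx]
        omega
      · have hpre : List.isPrefixOf [c] (x :: t) = false := by
          simp [List.isPrefixOf]
          exact fun hc => hx hc.symm
        simp only [hpre]
        rw [ih t acc (by simpa using h), List.count_cons]
        simp
        exact hx

theorem count_singleton (l : List Char) (c : Char) :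
    PySem.Chars.count l [c] = l.count c := by
  rw [PySem.Chars.count]
  simpa using count_go_singleton c l.length l 0 le_rfl

-- str(i) for a single digit i
theorem toList_toStr_digit (i : Int) (h0 : 0 ≤ i) (h1 : i < 10) :
    (PySem.Int.toStr i).toList = [Nat.digitChar i.toNat] := by
  rw [PySem.Int.toList_toStr]
  simp only [PySem.Int.toChars]
  rw [if_neg (by omega : ¬ i < 0), Nat.toDigits_of_lt_base (by omega : i.toNat < 10)]

theorem toStr_digit (i : Int) (h0 : 0 ≤ i) (h1 : i < 10) :
    PySem.Int.toStr i = String.ofList [Nat.digitChar i.toNat] := by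
  calc PySem.Int.toStr i = String.ofList (PySem.Int.toStr i).toList := by
        rw [String.ofList_toList]
    _ = String.ofList [Nat.digitChar i.toNat] := by rw [toList_toStr_digit i h0 h1]

theorem ofList_singleton_inj : Function.Injective (fun c => String.ofList [c]) := by
  intro a b hab
  have := congrArg String.toList hab
  simpa using this

-- B's one-pass dict counter, looked up at a one-char key, is a character count
theorem counter_getD (chars : List Char) (v : String) :
    (chars.foldl (fun (d : PySem.Dict String Int) ch =>
        d.insert (String.ofList [ch]) (d.getD (String.ofList [ch]) 0 + 1)) PySem.Dict.empty).getD v 0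
      = ((chars.map (fun c => String.ofList [c])).count v : Int) := by
  rw [show chars.foldl (fun (d : PySem.Dict String Int) ch =>
        d.insert (String.ofList [ch]) (d.getD (String.ofList [ch]) 0 + 1)) PySem.Dict.empty
      = (chars.map (fun c => String.ofList [c])).foldl
          (fun (d : PySem.Dict String Int) x => d.insert x (d.getD x 0 + 1)) PySem.Dict.empty by
    rw [List.foldl_map]]
  rw [PySem.Dict.getD_foldl_insert_add_one]
  simp [PySem.Dict.getD, PySem.Dict.empty, PySem.Dict.get?]

-- A's per-digit str().count equals B's counter lookup, digit by digit
theorem count_bridge (b i : Int) (h0 : 0 ≤ i) (h1 : i < 10) :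
    ((PySem.Str.count (PySem.Int.toStr b) (PySem.Int.toStr i)) : Int)
      = ((PySem.Int.toStr b).toList.foldl (fun (d : PySem.Dict String Int) ch =>
          d.insert (String.ofList [ch]) (d.getD (String.ofList [ch]) 0 + 1))
          PySem.Dict.empty).getD (PySem.Int.toStr i) 0 := by
  rw [counter_getD, toStr_digit i h0 h1,
      List.count_map_of_injective _ (fun c => String.ofList [c]) ofList_singleton_inj]
  rw [PySem.Str.count_eq]
  simp only [String.toList_ofList]
  rw [count_singleton]

-- ===== VERDICT (by name: the statement is the Claim_ definition above) =====
theorem fib_digits_spec : Claim_equal_fib_digits := by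
  intro n _
  unfold Spec_fib_digits fib_digits fib_digits_alt
  have hb : ((PySem.List.pyRange 0 (n - 1) 1).foldl
      (fun (s : Int × Int) _i => (s.2, s.1 + s.2)) (0, 1)).2
        = (Nat.fib (if 1 < n then n else 1).toNat : Int) := by
    have h0 : ((0 : Int), (1 : Int)) = ((Nat.fib 0 : Int), (Nat.fib (0 + 1) : Int)) := by
      norm_num
    rw [h0, foldl_fib]
    have hlen : (PySem.List.pyRange 0 (n - 1) 1).length = (n - 1).toNat := by
      rw [PySem.List.length_pyRange_one]; norm_num
    rw [hlen]
    rw [show 0 + (n - 1).toNat + 1 = (if 1 < n then n else 1).toNat by split_ifs <;> omega]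
  have ha : (pvFd (if 1 < n then n else 1).toNat).1
      = (Nat.fib (if 1 < n then n else 1).toNat : Int) := by
    rw [pvFd_eq_fib]
  simp only [hb, ha]
  congr 1
  have hcnt : ∀ i ∈ PySem.List.pyRange 0 10 1,
      ((PySem.Str.count (PySem.Int.toStr (Nat.fib (if 1 < n then n else 1).toNat : Int))
          (PySem.Int.toStr i) : Int))
        = ((PySem.Int.toStr (Nat.fib (if 1 < n then n else 1).toNat : Int)).toList.foldl
            (fun (d : PySem.Dict String Int) ch =>
              d.insert (String.ofList [ch]) (d.getD (String.ofList [ch]) 0 + 1))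
            PySem.Dict.empty).getD (PySem.Int.toStr i) 0 := by
    intro i hi
    rw [PySem.List.mem_pyRange_one] at hi
    exact count_bridge _ i hi.1 hi.2
  rw [List.filter_congr (by intro i hi; rw [hcnt i hi])]
  apply List.map_congr_left
  intro i hi
  rw [hcnt i (List.mem_of_mem_filter hi)]
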